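-- pv_equiv track=rewrite | github.com/daniel-reich/ubiquitous-fiesta | bJxNHk7aovkx8Q776_20.py | gold_distribution
-- ===== SOURCE A (Python) =====
-- def gold_distribution(gold):
--   res = [0, 0]
--   turn = 0
--   while gold:
--     bigger = 0 if gold[0] >= gold[-1] else -1
--     res[turn] += gold.pop(bigger)
--     turn = not turn
--   return res
-- ===== SOURCE B (Python) =====
-- def gold_distribution(gold):
--     res = [0, 0]
--     i, j = 0, len(gold) - 1
--     turn = 0
--     while i <= j:
--         if gold[i] >= gold[j]:
--             res[turn] += gold[i]
--             i += 1
--         else: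
--             res[turn] += gold[j]
--             j -= 1
--         turn ^= 1
--     return res
-- ===== Notes on version B (the rewrite author's own statement) =====
-- stated objective: alternative
-- what changed: Replaces the destructive list.pop(0)/pop(-1) loop with two index pointers walking in from both ends, so no element is ever shifted and the input list is not mutated.
import Mathlib
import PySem

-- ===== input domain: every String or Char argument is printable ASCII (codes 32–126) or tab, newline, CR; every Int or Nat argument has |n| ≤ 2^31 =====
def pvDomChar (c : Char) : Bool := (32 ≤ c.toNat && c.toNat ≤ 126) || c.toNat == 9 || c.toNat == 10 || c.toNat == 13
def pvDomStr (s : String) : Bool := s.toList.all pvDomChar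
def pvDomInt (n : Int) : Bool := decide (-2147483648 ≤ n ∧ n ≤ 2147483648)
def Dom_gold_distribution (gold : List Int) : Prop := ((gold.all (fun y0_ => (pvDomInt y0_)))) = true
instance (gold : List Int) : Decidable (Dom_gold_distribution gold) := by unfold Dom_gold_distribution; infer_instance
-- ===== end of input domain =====

-- B replaces A's destructive pop(0)/pop(-1) loop by two index pointers walking in from both
-- ends, so the input list is never shifted or mutated; return values agree on every input.
-- The equivalence proved is about the RETURN value only: Python A empties the caller's list, B does not.

-- ===== PORT A =====
-- A's while loop: pop the bigger end (front if gold[0] >= gold[-1], else back), add to res[turn],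
-- toggle turn.  The Nat fuel only makes the recursion structural; gold.length steps always suffice.
def goldA : Nat → List Int → Int → Int → Bool → Int × Int
  | 0, _, r0, r1, _ => (r0, r1)
  | _ + 1, [], r0, r1, _ => (r0, r1)
  | f + 1, x :: xs, r0, r1, turn =>
    if x ≥ (x :: xs).getLast (List.cons_ne_nil x xs) then
      if turn then goldA f xs r0 (r1 + x) false else goldA f xs (r0 + x) r1 true
    else
      if turn then goldA f (x :: xs).dropLast r0 (r1 + (x :: xs).getLast (List.cons_ne_nil x xs)) false
      else goldA f (x :: xs).dropLast (r0 + (x :: xs).getLast (List.cons_ne_nil x xs)) r1 true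

def gold_distribution (gold : List Int) : List Int :=
  let p := goldA gold.length gold 0 0 false
  [p.1, p.2]

-- ===== PORT B =====
-- B's while loop over Int indices i ≤ j; gold[i]/gold[j] are always in range when the loop runs.
-- Fuel as above: the loop runs at most gold.length times.
def goldB : Nat → List Int → Int → Int → Int → Int → Bool → Int × Int
  | 0, _, _, _, r0, r1, _ => (r0, r1)
  | f + 1, gold, i, j, r0, r1, turn =>
    if i ≤ j then
      if PySem.List.pyGetD gold i 0 ≥ PySem.List.pyGetD gold j 0 then
        if turn then goldB f gold (i + 1) j r0 (r1 + PySem.List.pyGetD gold i 0) false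
        else goldB f gold (i + 1) j (r0 + PySem.List.pyGetD gold i 0) r1 true
      else
        if turn then goldB f gold i (j - 1) r0 (r1 + PySem.List.pyGetD gold j 0) false
        else goldB f gold i (j - 1) (r0 + PySem.List.pyGetD gold j 0) r1 true
    else (r0, r1)

def gold_distribution_alt (gold : List Int) : List Int :=
  let p := goldB gold.length gold 0 ((gold.length : Int) - 1) 0 0 false
  [p.1, p.2]

-- ===== PRECONDITION & SPEC =====
def Spec_gold_distribution (gold : List Int) (out : List Int) : Prop := out = gold_distribution_alt gold
instance (gold : List Int) (out : List Int) : Decidable (Spec_gold_distribution gold out) := by unfold Spec_gold_distribution; infer_instance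

-- ===== CLAIM (what is proved, stated in full; the proofs are below) =====
def Claim_equal_gold_distribution : Prop := ∀ (gold : List Int), Dom_gold_distribution gold → Spec_gold_distribution gold (gold_distribution gold)

-- ===== LEMMAS AND PROOFS =====

theorem goldA_nil (f : Nat) (r0 r1 : Int) (t : Bool) : goldA f [] r0 r1 t = (r0, r1) := by
  cases f <;> rfl

theorem goldB_stop (f : Nat) (gold : List Int) (i j : Int) (h : ¬ i ≤ j)
    (r0 r1 : Int) (t : Bool) : goldB f gold i j r0 r1 t = (r0, r1) := by
  cases f with
  | zero => rfl
  | succ f => simp [goldB, h]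

-- The segment gold[a..b] (inclusive) that B's pointers delimit.
def seg (gold : List Int) (a b : Nat) : List Int := (gold.drop a).take (b + 1 - a)

theorem seg_empty (gold : List Int) (a b : Nat) (h : b + 1 ≤ a) : seg gold a b = [] := by
  unfold seg; simp; omega

theorem seg_cons (gold : List Int) (a b : Nat) (ha : a ≤ b) (hb : b < gold.length) :
    seg gold a b = gold[a] :: seg gold (a + 1) b := by
  unfold seg
  rw [show b + 1 - a = (b + 1 - (a + 1)) + 1 by omega,
    List.drop_eq_getElem_cons (show a < gold.length by omega), List.take_succ_cons]

theorem seg_getLast? (gold : List Int) (a b : Nat) (ha : a ≤ b) (hb : b < gold.length) :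
    (seg gold a b).getLast? = some gold[b] := by
  unfold seg
  rw [List.getLast?_eq_getElem?]
  have hlen : ((gold.drop a).take (b + 1 - a)).length = b + 1 - a := by
    simp; omega
  rw [hlen]
  rw [List.getElem?_take_of_lt (by omega), List.getElem?_drop,
    show a + (b + 1 - a - 1) = b by omega, List.getElem?_eq_getElem hb]

theorem getLast_of_getLast? {l : List Int} (h : l ≠ []) {x : Int}
    (hx : l.getLast? = some x) : l.getLast h = x := by
  rw [List.getLast?_eq_some_getLast h] at hx
  exact Option.some.inj hx

theorem seg_dropLast (gold : List Int) (a b : Nat) (ha : a < b) (hb : b < gold.length) :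
    (seg gold a b).dropLast = seg gold a (b - 1) := by
  unfold seg
  rw [List.dropLast_eq_take, List.take_take]
  congr 1
  simp only [List.length_take, List.length_drop]
  omega

-- Main invariant: A on the segment [a..b] equals B with pointers a, b (with enough fuel).
theorem goldA_eq_goldB (n : Nat) (gold : List Int) (a b : Nat) (hb : b < gold.length)
    (hn : b + 1 - a = n) (fa fb : Nat) (hfa : n ≤ fa) (hfb : n ≤ fb)
    (r0 r1 : Int) (turn : Bool) :
    goldA fa (seg gold a b) r0 r1 turn = goldB fb gold (a : Int) (b : Int) r0 r1 turn := by
  induction n generalizing a b fa fb r0 r1 turn with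
  | zero =>
    rw [seg_empty gold a b (by omega), goldA_nil, goldB_stop _ _ _ _ (by omega)]
  | succ n ih =>
    have hab : a ≤ b := by omega
    obtain ⟨fa', rfl⟩ : ∃ fa', fa = fa' + 1 := ⟨fa - 1, by omega⟩
    obtain ⟨fb', rfl⟩ : ∃ fb', fb = fb' + 1 := ⟨fb - 1, by omega⟩
    have hlast : (gold[a] :: seg gold (a + 1) b).getLast (List.cons_ne_nil _ _) = gold[b] := by
      apply getLast_of_getLast?
      rw [← seg_cons gold a b hab hb]
      exact seg_getLast? gold a b hab hb
    have hga : PySem.List.pyGetD gold (a : Int) 0 = gold[a] := by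
      rw [PySem.List.pyGetD_natCast, List.getD_eq_getElem?_getD,
        List.getElem?_eq_getElem (by omega)]; rfl
    have hgb : PySem.List.pyGetD gold (b : Int) 0 = gold[b] := by
      rw [PySem.List.pyGetD_natCast, List.getD_eq_getElem?_getD,
        List.getElem?_eq_getElem hb]; rfl
    rw [seg_cons gold a b hab hb]
    simp only [goldA, goldB, hlast, hga, hgb]
    rw [if_pos (show (a : Int) ≤ (b : Int) by exact_mod_cast hab)]
    by_cases hge : gold[a] ≥ gold[b]
    · rw [if_pos hge, if_pos hge]
      have hrec : ∀ r0 r1 t, goldA fa' (seg gold (a + 1) b) r0 r1 t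
          = goldB fb' gold ((a : Int) + 1) (b : Int) r0 r1 t := by
        intro r0 r1 t
        by_cases h2 : a + 1 ≤ b
        · have := ih (a + 1) b hb (by omega) fa' fb' (by omega) (by omega) r0 r1 t
          push_cast at this
          exact this
        · rw [seg_empty gold (a + 1) b (by omega), goldA_nil,
            goldB_stop _ _ _ _ (by omega)]
      cases turn <;> simp [hrec]
    · rw [if_neg hge, if_neg hge]
      have hlt : a < b := by
        rcases Nat.lt_or_ge a b with h | h
        · exact h
        · exact absurd (le_antisymm hab h ▸ le_refl gold[a]) hge
      rw [← seg_cons gold a b hab hb, seg_dropLast gold a b hlt hb]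
      have hrec : ∀ r0 r1 t, goldA fa' (seg gold a (b - 1)) r0 r1 t
          = goldB fb' gold (a : Int) ((b : Int) - 1) r0 r1 t := by
        intro r0 r1 t
        have := ih a (b - 1) (by omega) (by omega) fa' fb' (by omega) (by omega) r0 r1 t
        rw [this]
        congr 1
        omega
      cases turn <;> simp [hrec]

theorem gold_eq (gold : List Int) : gold_distribution gold = gold_distribution_alt gold := by
  unfold gold_distribution gold_distribution_alt
  cases gold with
  | nil =>
    rw [goldA_nil, goldB_stop _ _ _ _ (by norm_num)]
  | cons x xs =>
    have h := goldA_eq_goldB (x :: xs).length (x :: xs) 0 ((x :: xs).length - 1)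
      (by simp) (by simp) (x :: xs).length (x :: xs).length le_rfl le_rfl 0 0 false
    have hseg : seg (x :: xs) 0 ((x :: xs).length - 1) = x :: xs := by
      unfold seg; simp
    rw [hseg] at h
    have hcast : (((x :: xs).length - 1 : Nat) : Int) = ((x :: xs).length : Int) - 1 := by
      have hx : (x :: xs).length = xs.length + 1 := rfl
      omega
    rw [hcast, Nat.cast_zero] at h
    rw [h]

-- ===== VERDICT (by name: the statement is the Claim_ definition above) =====
theorem gold_distribution_spec : Claim_equal_gold_distribution := by
  intro gold _
  unfold Spec_gold_distribution
  exact gold_eq gold
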